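-- pv_equiv track=rewrite | github.com/reemashraf/OS-Distributed-System-Project | DataBase/server.py | getShard
-- ===== SOURCE A (Python) =====
-- shards = [
--     "a-g",
--     "h-m",
--     "n-t",
--     "u-z"
-- ]
--
-- def getShard(username):
--     userkey = username[0].lower()
--     shard = 0
--     for key in shards:
--         shard = shard + 1
--         symbols = key.split("-")
--         if userkey >= symbols[0] and userkey <= symbols[1]:
--             return shard
--     return False
-- ===== SOURCE B (Python) =====
-- shards = [
--     "a-g",
--     "h-m",
--     "n-t",
--     "u-z"
-- ]
--
-- # Precomputed letter -> shard-number table, built once by expanding each range.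
-- _table = {}
-- for _i, _key in enumerate(shards):
--     _lo, _hi = _key.split("-")
--     for _code in range(ord(_lo), ord(_hi) + 1):
--         _table[chr(_code)] = _i + 1
--
--
-- def getShard(username):
--     userkey = username[0].lower()
--     return _table.get(userkey, False)
-- ===== Notes on version B (the rewrite author's own statement) =====
-- stated objective: idiomatic
-- what changed: Replaces the per-call linear scan over the shard ranges with a letter-to-shard dictionary built once by expanding the four inclusive ranges; getShard is a single table lookup with False as the miss default.
-- outside the precondition, e.g. on getShard('0'): A returns False, B returns False; on getShard('-x'): A returns False, B returns False
import Mathlib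
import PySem

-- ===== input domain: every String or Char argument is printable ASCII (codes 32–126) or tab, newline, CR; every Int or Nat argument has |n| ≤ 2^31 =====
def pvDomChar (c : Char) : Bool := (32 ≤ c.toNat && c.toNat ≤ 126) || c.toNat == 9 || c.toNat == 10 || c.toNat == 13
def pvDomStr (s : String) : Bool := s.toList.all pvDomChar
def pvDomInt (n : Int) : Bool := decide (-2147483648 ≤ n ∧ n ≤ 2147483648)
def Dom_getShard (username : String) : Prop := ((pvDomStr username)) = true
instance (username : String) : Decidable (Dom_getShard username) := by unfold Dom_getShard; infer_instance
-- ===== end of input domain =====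

-- B replaces A's per-call linear scan of the shard ranges with a letter→shard table built once; same results.

-- ===== PORT A =====
def getShardShards : List String := ["a-g", "h-m", "n-t", "u-z"]

-- the for-loop over shards with the early return; shard is the running counter
def getShardLoop (userkey : List Char) : List String → Int → Int
  | [], _ => 0          -- Python: return False (False == 0 as int)
  | key :: rest, shard =>
    let shard := shard + 1
    let symbols := (PySem.Str.splitMax? key "-" (-1)).getD []   -- key.split("-"); sep ≠ "" so never none
    let s0 := PySem.List.pyGetD symbols 0 ""                    -- symbols[0]; in range for every literal shard
    let s1 := PySem.List.pyGetD symbols 1 ""                    -- symbols[1]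
    if !PySem.Chars.strLt userkey s0.toList && !PySem.Chars.strLt s1.toList userkey then shard
    else getShardLoop userkey rest shard

def getShard (username : String) : Int :=
  match PySem.Str.pyGet? username 0 with
  | none => 0                                                   -- IndexError on empty username; excluded by Pre_
  | some c => getShardLoop (PySem.Chars.lower [c]) getShardShards 0

-- ===== PORT B =====
-- the module-level table build: for i, key in enumerate(shards): lo, hi = key.split("-"); for code in range(ord(lo), ord(hi)+1): _table[chr(code)] = i+1
-- ord of a 1-char string / chr ported by hand as head-char .toNat / Char.ofNat (exact on these ASCII literals)
def getShardTable : PySem.Dict (List Char) Int :=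
  (PySem.List.enumerate getShardShards).foldl
    (fun t p =>
      let parts := (PySem.Str.splitMax? p.2 "-" (-1)).getD []
      let lo := (PySem.List.pyGetD parts 0 "").toList.headD ' '
      let hi := (PySem.List.pyGetD parts 1 "").toList.headD ' '
      (PySem.List.pyRange lo.toNat (hi.toNat + 1) 1).foldl
        (fun t code => t.insert [Char.ofNat code.toNat] (p.1 + 1)) t)
    PySem.Dict.empty

def getShard_alt (username : String) : Int :=
  match PySem.Str.pyGet? username 0 with
  | none => 0                                                   -- IndexError on empty username; excluded by Pre_
  | some c => getShardTable.getD (PySem.Chars.lower [c]) 0      -- _table.get(userkey, False)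

-- ===== PRECONDITION & SPEC =====
-- Pre_ excludes the empty string, on which username[0] raises IndexError, and strings whose first
-- character is not an ASCII letter, on which A returns the bool False rather than a value of the
-- declared int return type (B returns the same False there).
def Pre_getShard (username : String) : Prop :=
  username ≠ "" ∧
  ((65 ≤ (username.toList.headD ' ').toNat ∧ (username.toList.headD ' ').toNat ≤ 90) ∨
   (97 ≤ (username.toList.headD ' ').toNat ∧ (username.toList.headD ' ').toNat ≤ 122))
instance (username : String) : Decidable (Pre_getShard username) := by unfold Pre_getShard; infer_instance
def pvWitness_getShard : String := "bob"

def Spec_getShard (username : String) (out : Int) : Prop := out = getShard_alt username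
instance (username : String) (out : Int) : Decidable (Spec_getShard username out) := by unfold Spec_getShard; infer_instance

-- ===== CLAIM (what is proved, stated in full; the proofs are below) =====
def Claim_equal_getShard : Prop := ∀ (username : String), Dom_getShard username → Pre_getShard username → Spec_getShard username (getShard username)

-- ===== LEMMAS AND PROOFS =====

-- both programs agree on every ASCII first character (checked by evaluation over all 127 codes)
set_option maxRecDepth 8192 in
theorem getShard_char_agree : ∀ n : Fin 127,
    getShardLoop (PySem.Chars.lower [Char.ofNat n.val]) getShardShards 0
      = getShardTable.getD (PySem.Chars.lower [Char.ofNat n.val]) 0 := by decide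

-- ===== VERDICT (by name: the statement is the Claim_ definition above) =====
theorem getShard_spec : Claim_equal_getShard := by
  intro username hdom hpre
  unfold Spec_getShard getShard getShard_alt
  have hne : username.toList ≠ [] := fun h => hpre.1 (String.toList_eq_nil_iff.mp h)
  obtain ⟨c, rest, hct⟩ : ∃ c rest, username.toList = c :: rest := by
    cases hcl : username.toList with
    | nil => exact absurd hcl hne
    | cons c rest => exact ⟨c, rest, rfl⟩
  have hget : PySem.Str.pyGet? username 0 = some c := by
    simp [hct]
  rw [hget]
  have hdc : pvDomChar c = true := by
    have := (List.all_eq_true.mp hdom) c (by rw [hct]; exact List.mem_cons_self ..)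
    exact this
  have hle : c.toNat ≤ 126 := by
    simp [pvDomChar] at hdc
    omega
  have hc : c = Char.ofNat c.toNat := (Char.ofNat_toNat c).symm
  have := getShard_char_agree ⟨c.toNat, by omega⟩
  rw [hc]
  exact this
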